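-- pv_equiv track=rewrite | github.com/smontanaro/csvprogs | data_filters/data_filters/square.py | remove_dups
-- ===== SOURCE A (Python) =====
-- def remove_dups(iterator, keys, blank):
--     last = []
--     row = None
--     for row in iterator:
--         value = [row[k] for k in keys]
--         if value != last:
--             yield row
--         elif blank:
--             for k in keys:
--                 row[k] = ""
--             yield row
--         last = value
--     if row is not None:
--         yield row
-- ===== SOURCE B (Python) =====
-- def _consecutive_groups(iterator, keyfn):
--     cur_key = None
--     cur = []
--     for row in iterator:
--         k = keyfn(row)
--         if cur and k == cur_key:
--             cur.append(row)
--         else: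
--             if cur:
--                 yield cur
--             cur = [row]
--             cur_key = k
--     if cur:
--         yield cur
--
--
-- def remove_dups(iterator, keys, blank):
--     last_row = None
--     for group in _consecutive_groups(iterator, lambda r: [r[k] for k in keys]):
--         first, rest = group[0], group[1:]
--         yield first
--         last_row = first
--         for row in rest:
--             if blank:
--                 for k in keys:
--                     row[k] = ""
--                 yield row
--             last_row = row
--     if last_row is not None:
--         yield last_row
-- ===== Notes on version B (the rewrite author's own statement) =====
-- stated objective: idiomatic
-- what changed: A's single loop comparing each row's key tuple against a carried `last` sentinel is replaced by a groupby decomposition: a helper splits the iterator into consecutive runs of equal key tuples, and each run is emitted as first-row-unchanged plus blanked-or-skipped followers (with the same trailing re-yield of the last row).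
-- intended difference: On a nonempty iterator with keys == [] and blank False, A's sentinel last = [] equals the empty key tuple, so A drops the first row and returns only the trailing re-yield of the last row, while B returns the first row of the single run plus the trailing re-yield, which is the intended 'keep the first of each run' behaviour. — e.g. on remove_dups([[("a", "1")], [("a", "2")]], [], false): A returns [[("a", "2")]], B returns [[("a", "1")], [("a", "2")]]
import Mathlib
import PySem

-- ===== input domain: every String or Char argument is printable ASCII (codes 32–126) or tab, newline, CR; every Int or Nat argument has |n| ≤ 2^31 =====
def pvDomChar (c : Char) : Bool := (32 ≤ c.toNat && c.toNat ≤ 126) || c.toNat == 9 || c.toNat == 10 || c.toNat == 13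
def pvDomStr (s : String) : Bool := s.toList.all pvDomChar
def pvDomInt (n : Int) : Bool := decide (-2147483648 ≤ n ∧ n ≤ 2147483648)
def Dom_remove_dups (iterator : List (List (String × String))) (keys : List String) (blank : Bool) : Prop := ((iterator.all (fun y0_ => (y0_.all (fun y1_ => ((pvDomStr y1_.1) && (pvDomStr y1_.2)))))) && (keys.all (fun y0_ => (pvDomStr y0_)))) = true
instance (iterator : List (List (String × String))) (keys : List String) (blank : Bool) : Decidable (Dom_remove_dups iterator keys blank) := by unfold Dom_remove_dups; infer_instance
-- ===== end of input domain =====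

-- B regroups A's last-value-comparison loop as an idiomatic groupby decomposition (consecutive
-- runs of equal key tuples, first of each run kept, later rows blanked or skipped); same cost.
-- Both A and B mutate the row dicts in place when `blank` is set (identically); the equivalence
-- proved here is about the sequence of yielded values.

-- ===== PORT A =====
-- value = [row[k] for k in keys] (the same comprehension occurs in Source A and Source B; getD's default
-- is unreachable under Pre_, where every key is present — Python raises KeyError otherwise)
def pvValue (keys : List String) (r : List (String × String)) : List String :=
  keys.map (fun k => (PySem.Dict.mk r).getD k "")

-- for k in keys: row[k] = ""  (dict assignment: overwrite in place; same loop in Source A and Source B)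
def pvBlankRow (keys : List String) (r : List (String × String)) : List (String × String) :=
  (keys.foldl (fun d k => d.insert k "") (PySem.Dict.mk r)).items

-- A's single for-loop over the iterator, state (last, row, yields-so-far), then the trailing re-yield
def pvALoop (keys : List String) (blank : Bool) :
    List String → Option (List (String × String)) → List (List (String × String)) →
    List (List (String × String)) → List (List (String × String))
  | _, rowv, out, [] =>
    match rowv with
    | none => out
    | some r => out ++ [r]
  | last, _, out, r :: rest =>
    let value := pvValue keys r
    if value ≠ last then
      pvALoop keys blank value (some r) (out ++ [r]) rest
    else if blank then
      let r' := pvBlankRow keys r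
      pvALoop keys blank value (some r') (out ++ [r']) rest
    else
      pvALoop keys blank value (some r) out rest

def remove_dups (iterator : List (List (String × String))) (keys : List String) (blank : Bool) : List (List (String × String)) :=
  pvALoop keys blank [] none [] iterator

-- ===== PORT B =====
-- _consecutive_groups: loop with state (cur_key, cur), yielding finished groups
-- (Python's initial cur_key=None is only read when cur is nonempty, so [] stands in for None)
def pvGroupsLoop (keyfn : List (String × String) → List String) :
    List String → List (List (String × String)) → List (List (String × String)) →
    List (List (List (String × String)))
  | _, cur, [] => if cur = [] then [] else [cur]
  | curKey, cur, r :: xs =>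
    let k := keyfn r
    if cur ≠ [] ∧ k = curKey then
      pvGroupsLoop keyfn curKey (cur ++ [r]) xs
    else if cur = [] then
      pvGroupsLoop keyfn k [r] xs
    else
      cur :: pvGroupsLoop keyfn k [r] xs

def pvGroups (keyfn : List (String × String) → List String) (xs : List (List (String × String))) :
    List (List (List (String × String))) :=
  pvGroupsLoop keyfn [] [] xs

-- body of B's inner `for row in rest` loop, state (yields-so-far, last_row)
def pvGroupStep (keys : List String) (blank : Bool)
    (s : List (List (String × String)) × List (String × String))
    (row : List (String × String)) :
    List (List (String × String)) × List (String × String) :=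
  if blank then
    let r' := pvBlankRow keys row
    (s.1 ++ [r'], r')
  else (s.1, row)

-- one group: yield first, last_row = first, then the inner loop over rest = group[1:]
def pvProcGroup (keys : List String) (blank : Bool)
    (first : List (String × String)) (rest : List (List (String × String))) :
    List (List (String × String)) × List (String × String) :=
  rest.foldl (pvGroupStep keys blank) ([first], first)

-- body of B's outer `for group in _consecutive_groups(...)` loop, state (yields-so-far, last_row)
def pvAltStep (keys : List String) (blank : Bool)
    (s : List (List (String × String)) × Option (List (String × String)))
    (g : List (List (String × String))) :
    List (List (String × String)) × Option (List (String × String)) :=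
  match g with
  | [] => s
  | f :: rest =>
    let p := pvProcGroup keys blank f rest
    (s.1 ++ p.1, some p.2)

def remove_dups_alt (iterator : List (List (String × String))) (keys : List String) (blank : Bool) : List (List (String × String)) :=
  let st := (pvGroups (pvValue keys) iterator).foldl (pvAltStep keys blank) ([], none)
  match st.2 with
  | none => st.1
  | some r => st.1 ++ [r]

-- ===== PRECONDITION & SPEC =====
-- Pre_ excludes exactly the inputs where some row lacks one of the keys: there Python A
-- (and B alike) raises KeyError at `row[k]`.
def Pre_remove_dups (iterator : List (List (String × String))) (keys : List String) (blank : Bool) : Prop :=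
  ∀ r ∈ iterator, ∀ k ∈ keys, (PySem.Dict.mk r).contains k = true
instance (iterator : List (List (String × String))) (keys : List String) (blank : Bool) : Decidable (Pre_remove_dups iterator keys blank) := by unfold Pre_remove_dups; infer_instance
def pvWitness_remove_dups : (List (List (String × String))) × List String × Bool :=
  ([[("a", "1")], [("a", "1")], [("a", "2")]], ["a"], true)

-- On a nonempty iterator with keys == [] and blank False, A's sentinel last = [] collides with the
-- empty key tuple, so A drops the first row (returning only the trailing re-yield of the last row)
-- while B returns first row and last row, keeping the first row of the (single) run as intended.
def D_remove_dups (iterator : List (List (String × String))) (keys : List String) (blank : Bool) : Prop :=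
  iterator ≠ [] ∧ keys = [] ∧ blank = false
instance (iterator : List (List (String × String))) (keys : List String) (blank : Bool) : Decidable (D_remove_dups iterator keys blank) := by unfold D_remove_dups; infer_instance

def Spec_remove_dups (iterator : List (List (String × String))) (keys : List String) (blank : Bool) (out : List (List (String × String))) : Prop := ¬ D_remove_dups iterator keys blank → out = remove_dups_alt iterator keys blank
instance (iterator : List (List (String × String))) (keys : List String) (blank : Bool) (out : List (List (String × String))) : Decidable (Spec_remove_dups iterator keys blank out) := by unfold Spec_remove_dups; infer_instance

def pvDiffWitness_remove_dups : (List (List (String × String))) × List String × Bool :=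
  ([[("a", "1")], [("a", "2")]], [], false)
def pvDiffWitnessOut_remove_dups : (List (List (String × String))) × (List (List (String × String))) :=
  ([[("a", "2")]], [[("a", "1")], [("a", "2")]])

-- ===== CLAIM (what is proved, stated in full; the proofs are below) =====
def Claim_unchanged_remove_dups : Prop := ∀ (iterator : List (List (String × String))) (keys : List String) (blank : Bool), Dom_remove_dups iterator keys blank → Pre_remove_dups iterator keys blank → Spec_remove_dups iterator keys blank (remove_dups iterator keys blank)
def Claim_changed_remove_dups : Prop := Dom_remove_dups (pvDiffWitness_remove_dups.1) (pvDiffWitness_remove_dups.2.1) (pvDiffWitness_remove_dups.2.2) ∧ Pre_remove_dups (pvDiffWitness_remove_dups.1) (pvDiffWitness_remove_dups.2.1) (pvDiffWitness_remove_dups.2.2) ∧ D_remove_dups (pvDiffWitness_remove_dups.1) (pvDiffWitness_remove_dups.2.1) (pvDiffWitness_remove_dups.2.2) ∧ remove_dups (pvDiffWitness_remove_dups.1) (pvDiffWitness_remove_dups.2.1) (pvDiffWitness_remove_dups.2.2) = pvDiffWitnessOut_remove_dups.1 ∧ remove_dups_alt (pvDiffWitness_remove_dups.1) (pvDiffWitness_remove_dups.2.1)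 (pvDiffWitness_remove_dups.2.2) = pvDiffWitnessOut_remove_dups.2 ∧ pvDiffWitnessOut_remove_dups.1 ≠ pvDiffWitnessOut_remove_dups.2
def Claim_exact_remove_dups : Prop := ∀ (iterator : List (List (String × String))) (keys : List String) (blank : Bool), Dom_remove_dups iterator keys blank → Pre_remove_dups iterator keys blank → D_remove_dups iterator keys blank → remove_dups iterator keys blank ≠ remove_dups_alt iterator keys blank

-- ===== LEMMAS AND PROOFS =====

-- finishing step shared by both ports: append the trailing re-yield if any row was seen
def pvFinish (s : List (List (String × String)) × Option (List (String × String))) :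
    List (List (String × String)) :=
  match s.2 with
  | none => s.1
  | some r => s.1 ++ [r]

theorem pvAlt_eq_finish (iterator : List (List (String × String))) (keys : List String) (blank : Bool) :
    remove_dups_alt iterator keys blank
      = pvFinish ((pvGroups (pvValue keys) iterator).foldl (pvAltStep keys blank) ([], none)) := rfl

-- yields accumulate on the left of A's loop
theorem pvALoop_append (keys : List String) (blank : Bool) :
    ∀ (xs : List (List (String × String))) last rowv out,
      pvALoop keys blank last rowv out xs = out ++ pvALoop keys blank last rowv [] xs := by
  intro xs
  induction xs with
  | nil => intro last rowv out; cases rowv <;> simp [pvALoop]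
  | cons r rest ih =>
    intro last rowv out
    simp only [pvALoop]
    split_ifs with h1 h2
    · rw [ih _ _ (out ++ [r]), ih _ _ ([] ++ [r])]; simp
    · rw [ih _ _ (out ++ [pvBlankRow keys r]), ih _ _ ([] ++ [pvBlankRow keys r])]; simp
    · exact ih _ _ out

-- main bridge: running B's grouping from a nonempty current group equals resuming A's loop
theorem pvBridge (keys : List String) (blank : Bool) :
    ∀ (xs : List (List (String × String))) curKey f cs accOut accLr,
      pvFinish ((pvGroupsLoop (pvValue keys) curKey (f :: cs) xs).foldl (pvAltStep keys blank) (accOut, accLr))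
        = pvALoop keys blank curKey (some (pvProcGroup keys blank f cs).2)
            (accOut ++ (pvProcGroup keys blank f cs).1) xs := by
  intro xs
  induction xs with
  | nil =>
    intro curKey f cs accOut accLr
    simp [pvGroupsLoop, pvAltStep, pvFinish, pvALoop, List.append_assoc]
  | cons r rest ih =>
    intro curKey f cs accOut accLr
    by_cases hk : pvValue keys r = curKey
    · have h1 : pvGroupsLoop (pvValue keys) curKey (f :: cs) (r :: rest)
          = pvGroupsLoop (pvValue keys) curKey (f :: (cs ++ [r])) rest := by
        simp [pvGroupsLoop, hk]
      rw [h1, ih]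
      have h2 : pvProcGroup keys blank f (cs ++ [r])
          = pvGroupStep keys blank (pvProcGroup keys blank f cs) r := by
        simp [pvProcGroup, List.foldl_append]
      rw [h2]
      cases blank with
      | false =>
        simp [pvGroupStep, pvALoop, hk]
      | true =>
        simp [pvGroupStep, pvALoop, hk, List.append_assoc]
    · have h1 : pvGroupsLoop (pvValue keys) curKey (f :: cs) (r :: rest)
          = (f :: cs) :: pvGroupsLoop (pvValue keys) (pvValue keys r) [r] rest := by
        simp [pvGroupsLoop, hk]
      rw [h1]
      have h2 : ∀ gs s, List.foldl (pvAltStep keys blank) s ((f :: cs) :: gs)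
          = List.foldl (pvAltStep keys blank) (pvAltStep keys blank s (f :: cs)) gs := by
        intro gs s; rfl
      rw [h2]
      have h3 : pvAltStep keys blank (accOut, accLr) (f :: cs)
          = (accOut ++ (pvProcGroup keys blank f cs).1, some (pvProcGroup keys blank f cs).2) := rfl
      rw [h3, ih]
      simp [pvProcGroup, pvALoop, hk, List.append_assoc]

-- ===== VERDICT (by name: the statement is the Claim_ definition above) =====
-- B on a nonempty iterator equals A's loop resumed after its first row was yielded
theorem pvAlt_cons (keys : List String) (blank : Bool) (r : List (String × String)) (rest : List (List (String × String))) :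
    remove_dups_alt (r :: rest) keys blank
      = pvALoop keys blank (pvValue keys r) (some r) [r] rest := by
  rw [pvAlt_eq_finish]
  have h1 : pvGroups (pvValue keys) (r :: rest)
      = pvGroupsLoop (pvValue keys) (pvValue keys r) [r] rest := by
    simp [pvGroups, pvGroupsLoop]
  rw [h1, pvBridge keys blank rest (pvValue keys r) r [] [] none]
  rfl

theorem pvBlankRow_nil (r : List (String × String)) : pvBlankRow [] r = r := rfl

theorem remove_dups_spec : Claim_unchanged_remove_dups := by
  intro iterator keys blank _ _ hND
  cases iterator with
  | nil => rfl
  | cons r rest =>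
    rw [pvAlt_cons]
    cases hkeys : keys with
    | cons k ks =>
      have hne : pvValue (k :: ks) r ≠ [] := by simp [pvValue]
      simp [remove_dups, pvALoop, hne]
    | nil =>
      have hb : blank = true := by
        rcases Bool.eq_false_or_eq_true blank with hb | hb
        · exact hb
        · exact absurd ⟨List.cons_ne_nil r rest, rfl, hb⟩ (hkeys ▸ hND)
      subst hb
      have hv : pvValue [] r = [] := rfl
      simp [remove_dups, pvALoop, hv, pvBlankRow_nil]

theorem remove_dups_changed : Claim_changed_remove_dups := by
  unfold Claim_changed_remove_dups; decide

theorem remove_dups_tight : Claim_exact_remove_dups := by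
  intro iterator keys blank _ _ hD
  obtain ⟨hne, hkeys, hblank⟩ := hD
  subst hkeys; subst hblank
  cases iterator with
  | nil => exact absurd rfl hne
  | cons r rest =>
    have hv : pvValue [] r = [] := rfl
    have hA : remove_dups (r :: rest) [] false
        = pvALoop [] false [] (some r) [] rest := by
      simp [remove_dups, pvALoop, hv]
    rw [pvAlt_cons, hA, hv, pvALoop_append [] false rest [] (some r) [r]]
    intro heq
    have := congrArg List.length heq
    simp at this
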